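-- pv_equiv track=rewrite | github.com/IsolatedRain/code_wars | completed/Four Letter Words ~ Mutations.py | mutations
-- ===== SOURCE A (Python) =====
-- def mutations(alice, bob, word, first):
--     aliceWords = [w for w in alice if len(set(w)) == 4]
--     bobWords = [w for w in bob if len(set(w)) == 4]
--     usedWords = {word}
--     curTurn = first
--     curWord = word
--
--     def oneLetterDiff(w1, w2):
--         cnt = 0
--         for i in range(4):
--             if w1[i] != w2[i]:
--                 cnt += 1
--         return cnt == 1
--
--     valid = False
--     for w in bobWords + aliceWords:
--         if oneLetterDiff(w, curWord):
--             valid = True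
--             break
--     if not valid: return -1
--
--     while 1:
--         curWords = aliceWords if not curTurn else bobWords
--         provided = False
--         for w in curWords:
--             if w not in usedWords:
--                 if oneLetterDiff(w, curWord):
--                     usedWords.add(w)
--                     curWord = w
--                     curTurn ^= 1
--                     provided = True
--                     break
--         if not provided:
--             return curTurn ^ 1
-- ===== SOURCE B (Python) =====
-- def mutations(alice, bob, word, first):
--     # Wildcard-pattern index: every candidate word is bucketed once under its four
--     # one-position-wildcard keys; each turn the mover's neighbors come from four
--     # bucket lookups (restored to original list order), not a rescan of the list.
--     pools = ([w for w in alice if len(set(w)) == 4],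
--              [w for w in bob if len(set(w)) == 4])
--     buckets = ({}, {})
--     for p in (0, 1):
--         for idx, w in enumerate(pools[p]):
--             for i in range(4):
--                 buckets[p].setdefault((w[:i], w[i + 1:4]), []).append((idx, w))
--
--     def neighbors(p, cur):
--         out = []
--         for i in range(4):
--             for idx, w in buckets[p].get((cur[:i], cur[i + 1:4]), []):
--                 if w[i] != cur[i]:
--                     out.append((idx, w))
--         out.sort(key=lambda t: t[0])
--         return [w for _, w in out]
--
--     if not (neighbors(1, word) or neighbors(0, word)):
--         return -1
--
--     used = {word}
--     cur, turn = word, first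
--     while True:
--         nxt = next((w for w in neighbors(0 if turn == 0 else 1, cur)
--                     if w not in used), None)
--         if nxt is None:
--             return turn ^ 1
--         used.add(nxt)
--         cur, turn = nxt, turn ^ 1
-- ===== Notes on version B (the rewrite author's own statement) =====
-- stated objective: alternative
-- what changed: B precomputes a wildcard-pattern hash index (each candidate word bucketed once under its four one-position-wildcard keys per player); each turn the mover's one-letter neighbors are obtained from four bucket lookups merged back into original list order, instead of A's rescan of the whole word list with a character-by-character diff against every entry.
import Mathlib
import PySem

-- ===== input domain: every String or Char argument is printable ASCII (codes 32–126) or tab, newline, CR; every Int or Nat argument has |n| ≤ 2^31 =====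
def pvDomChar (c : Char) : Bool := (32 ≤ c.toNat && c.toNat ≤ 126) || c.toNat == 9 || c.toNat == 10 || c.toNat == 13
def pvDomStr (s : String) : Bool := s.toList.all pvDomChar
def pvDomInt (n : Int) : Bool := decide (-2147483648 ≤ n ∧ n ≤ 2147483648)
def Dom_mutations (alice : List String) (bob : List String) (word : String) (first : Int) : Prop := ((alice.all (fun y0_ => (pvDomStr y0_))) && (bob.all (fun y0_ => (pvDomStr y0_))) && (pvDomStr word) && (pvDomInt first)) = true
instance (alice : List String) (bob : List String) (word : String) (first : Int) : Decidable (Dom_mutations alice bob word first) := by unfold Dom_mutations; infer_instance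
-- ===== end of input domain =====

-- B replaces A's per-turn rescan of the word lists by a wildcard-pattern bucket index
-- built once (each candidate word bucketed under its four one-position-wildcard keys);
-- each turn's neighbors come from four bucket lookups, merged back into list order.
-- Objective: alternative algorithm.

-- ===== PORT A =====
-- len(set(w)) == 4
def pvDistinct4A (w : String) : Bool := (PySem.Set.ofList w.toList).length == 4

-- A's oneLetterDiff: counter incremented over range(4); pyGet? is none exactly where
-- Python raises IndexError (those inputs are outside Pre_mutations).
def pvOneDiffA (w1 w2 : String) : Bool :=
  ((PySem.List.pyRange 0 4 1).foldl
    (fun cnt i =>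
      if (PySem.List.pyGet? w1.toList i) != (PySem.List.pyGet? w2.toList i) then cnt + 1 else cnt)
    (0 : Int)) == 1

-- A's 'while 1' loop; fuel = len(alice)+len(bob)+1 never runs out: each iteration
-- either returns or adds a previously unused list word to usedWords.
def pvLoopA (aliceWords bobWords : List String) :
    Nat → PySem.Set String → String → Int → Int
  | 0, _, _, _ => 0
  | fuel + 1, used, cur, turn =>
    let curWords := if turn == 0 then aliceWords else bobWords
    match curWords.find? (fun w => !(PySem.Set.contains used w) && pvOneDiffA w cur) with
    | none => PySem.Int.bxor turn 1
    | some w => pvLoopA aliceWords bobWords fuel (PySem.Set.add used w) w (PySem.Int.bxor turn 1)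

def mutations (alice : List String) (bob : List String) (word : String) (first : Int) : Int :=
  let aliceWords := alice.filter pvDistinct4A
  let bobWords := bob.filter pvDistinct4A
  let valid := (bobWords ++ aliceWords).any (fun w => pvOneDiffA w word)
  if !valid then -1
  else pvLoopA aliceWords bobWords (alice.length + bob.length + 1)
        (PySem.Set.ofList [word]) word first

-- ===== PORT B =====
-- len(set(w)) == 4 (B's copy of the same filter test)
def pvDistinct4B (w : String) : Bool := (PySem.Set.ofList w.toList).length == 4

-- the wildcard key (w[:i], w[i+1:4]); Python's tuple of strings is carried as the
-- pair of char lists (String equality = List Char equality, so dict lookups agree)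
def pvKeyB (w : String) (i : Int) : List Char × List Char :=
  (PySem.List.slice w.toList none (some i), PySem.List.slice w.toList (some (i+1)) (some 4))

-- for idx, w in enumerate(pool): for i in range(4): setdefault(key, []).append((idx, w))
def pvBucketsB (pool : List String) : PySem.Dict (List Char × List Char) (List (Int × String)) :=
  (PySem.List.enumerate pool).foldl
    (fun d p => (PySem.List.pyRange 0 4 1).foldl
      (fun d i => d.modify (pvKeyB p.2 i) [] (fun v => v ++ [p])) d)
    PySem.Dict.empty

-- neighbors(p, cur): four bucket lookups, keep mismatch at i, sort by index, drop indices
def pvNeighborsB (bk : PySem.Dict (List Char × List Char) (List (Int × String)))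
    (cur : String) : List String :=
  let out := (PySem.List.pyRange 0 4 1).foldl
    (fun acc i => (bk.getD (pvKeyB cur i) []).foldl
      (fun acc p =>
        if (PySem.List.pyGet? p.2.toList i) != (PySem.List.pyGet? cur.toList i)
        then acc ++ [p] else acc) acc) []
  (PySem.List.sorted out (fun p => p.1)).map (fun p => p.2)

-- B's 'while True' loop: first unused neighbor, else return turn ^ 1 (same fuel bound)
def pvLoopB (ba bb : PySem.Dict (List Char × List Char) (List (Int × String))) :
    Nat → PySem.Set String → String → Int → Int
  | 0, _, _, _ => 0
  | fuel + 1, used, cur, turn =>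
    match (pvNeighborsB (if turn == 0 then ba else bb) cur).find?
        (fun w => !(PySem.Set.contains used w)) with
    | none => PySem.Int.bxor turn 1
    | some w => pvLoopB ba bb fuel (PySem.Set.add used w) w (PySem.Int.bxor turn 1)

def mutations_alt (alice : List String) (bob : List String) (word : String) (first : Int) : Int :=
  let aPool := alice.filter pvDistinct4B
  let bPool := bob.filter pvDistinct4B
  let ba := pvBucketsB aPool
  let bb := pvBucketsB bPool
  if (pvNeighborsB bb word).isEmpty && (pvNeighborsB ba word).isEmpty then -1
  else pvLoopB ba bb (alice.length + bob.length + 1) (PySem.Set.ofList [word]) word first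

-- ===== PRECONDITION & SPEC =====
-- Pre_ excludes exactly the inputs where Python A raises IndexError: word shorter
-- than 4 characters while some list word has 4 distinct characters (oneLetterDiff
-- then indexes word[i] out of range).
def Pre_mutations (alice : List String) (bob : List String) (word : String) (first : Int) : Prop :=
  4 ≤ word.toList.length ∨ ∀ w ∈ alice ++ bob, (PySem.Set.ofList w.toList).length ≠ 4

instance (alice : List String) (bob : List String) (word : String) (first : Int) :
    Decidable (Pre_mutations alice bob word first) := by unfold Pre_mutations; infer_instance

def pvWitness_mutations : List String × List String × String × Int :=
  (["abce", "bcda"], ["abcf"], "abcd", 0)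

def Spec_mutations (alice : List String) (bob : List String) (word : String) (first : Int) (out : Int) : Prop := out = mutations_alt alice bob word first
instance (alice : List String) (bob : List String) (word : String) (first : Int) (out : Int) : Decidable (Spec_mutations alice bob word first out) := by unfold Spec_mutations; infer_instance

-- ===== CLAIM (what is proved, stated in full; the proofs are below) =====
def Claim_equal_mutations : Prop := ∀ (alice : List String) (bob : List String) (word : String) (first : Int), Dom_mutations alice bob word first → Pre_mutations alice bob word first → Spec_mutations alice bob word first (mutations alice bob word first)

-- ===== LEMMAS AND PROOFS =====

theorem pvLen4_decomp (l : List Char) (h : 4 ≤ l.length) :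
    ∃ a b c d t, l = a :: b :: c :: d :: t := by
  match l, h with
  | a :: b :: c :: d :: t, _ => exact ⟨a, b, c, d, t, rfl⟩

theorem pvKey_eval (w : String) (a b c d : Char) (t : List Char) (h : w.toList = a::b::c::d::t) :
    pvKeyB w 0 = ([], [b,c,d]) ∧ pvKeyB w 1 = ([a],[c,d]) ∧
    pvKeyB w 2 = ([a,b],[d]) ∧ pvKeyB w 3 = ([a,b,c],[]) := by
  refine ⟨?_, ?_, ?_, ?_⟩ <;>
  · simp only [pvKeyB, h, PySem.List.slice, PySem.List.clampIdx]
    norm_num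
    repeat' constructor

theorem pvGet_eval (w : String) (a b c d : Char) (t : List Char) (h : w.toList = a::b::c::d::t) :
    PySem.List.pyGet? w.toList 0 = some a ∧ PySem.List.pyGet? w.toList 1 = some b ∧
    PySem.List.pyGet? w.toList 2 = some c ∧ PySem.List.pyGet? w.toList 3 = some d := by
  refine ⟨?_, ?_, ?_, ?_⟩ <;>
  · simp only [h, PySem.List.pyGet?, PySem.List.pyIdx?]
    rw [if_pos (by norm_num), if_pos (by simp [List.length_cons]; omega)]
    simp

set_option maxHeartbeats 1000000 in
-- per-word bucket contribution: only position i's key can match a position-i key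
theorem pvContrib {β : Type} (cur w : String) (p : β)
    (hw : 4 ≤ w.toList.length) (hc : 4 ≤ cur.toList.length)
    (i : Int) (hi : i = 0 ∨ i = 1 ∨ i = 2 ∨ i = 3) :
    (([(0:Int),1,2,3].map (fun j => (pvKeyB w j, p))).filter
        (fun q => q.1 == pvKeyB cur i)).map (fun q => q.2)
      = if pvKeyB w i == pvKeyB cur i then [p] else [] := by
  obtain ⟨a,b,c,d,t,hw'⟩ := pvLen4_decomp _ hw
  obtain ⟨a',b',c',d',t',hc'⟩ := pvLen4_decomp _ hc
  obtain ⟨k0,k1,k2,k3⟩ := pvKey_eval w a b c d t hw'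
  obtain ⟨m0,m1,m2,m3⟩ := pvKey_eval cur a' b' c' d' t' hc'
  rcases hi with rfl|rfl|rfl|rfl <;>
    simp only [List.map_cons, List.map_nil, List.filter_cons, List.filter_nil,
      k0,k1,k2,k3,m0,m1,m2,m3, beq_eq_decide, Prod.ext_iff] <;> split_ifs <;> simp_all

def pvEntries (pool : List String) : List ((List Char × List Char) × (Int × String)) :=
  (PySem.List.enumerate pool).flatMap (fun p => [(0:Int),1,2,3].map (fun j => (pvKeyB p.2 j, p)))

theorem pvBuckets_eq (pool : List String) :
    pvBucketsB pool = (pvEntries pool).foldl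
      (fun d q => d.modify q.1 [] (fun v => v ++ [q.2])) PySem.Dict.empty := by
  unfold pvBucketsB pvEntries
  rw [List.foldl_flatMap]
  simp only [List.foldl_map, show PySem.List.pyRange 0 4 1 = [(0:Int),1,2,3] from by decide]

theorem pvBuckets_getD (pool : List String) (k : List Char × List Char) :
    (pvBucketsB pool).getD k []
      = ((pvEntries pool).filter (fun q => q.1 == k)).map (fun q => q.2) := by
  rw [pvBuckets_eq, PySem.Dict.getD_foldl_modify_append]
  simp [PySem.Dict.getD, PySem.Dict.empty, PySem.Dict.get?]

theorem pvFlatMapIf {α : Type} (l : List α) (p : α → Bool) :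
    (l.flatMap (fun x => if p x then [x] else [])) = l.filter p := by
  induction l with
  | nil => rfl
  | cons x xs ih => by_cases hx : p x <;> simp [hx, ih]

theorem pvBucket_i (pool : List String) (cur : String)
    (hpool : ∀ w ∈ pool, 4 ≤ w.toList.length) (hcur : 4 ≤ cur.toList.length)
    (i : Int) (hi : i = 0 ∨ i = 1 ∨ i = 2 ∨ i = 3) :
    (pvBucketsB pool).getD (pvKeyB cur i) []
      = (PySem.List.enumerate pool).filter (fun p => pvKeyB p.2 i == pvKeyB cur i) := by
  rw [pvBuckets_getD]
  unfold pvEntries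
  rw [List.filter_flatMap, List.map_flatMap]
  rw [show ((PySem.List.enumerate pool).flatMap
        (fun p => ((([(0:Int),1,2,3].map (fun j => (pvKeyB p.2 j, p))).filter
          (fun q => q.1 == pvKeyB cur i)).map (fun q => q.2))))
      = (PySem.List.enumerate pool).flatMap
        (fun p => if pvKeyB p.2 i == pvKeyB cur i then [p] else []) from
    List.flatMap_congr (fun p hp => pvContrib cur p.2 p
      (hpool p.2 (by
        rcases (PySem.List.mem_enumerate_iff _ _ _).1 hp with ⟨k, hk, rfl⟩
        exact List.getElem_mem hk)) hcur i hi)]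
  exact pvFlatMapIf _ _

theorem pvInsPerm {α : Type} (x : α) (l1 l2 : List α) {g : List α} (h : (l1 ++ l2).Perm g) :
    (l1 ++ x :: l2).Perm (x :: g) := List.perm_middle.trans (h.cons x)

theorem pvFilterPerm4 {α : Type} (q0 q1 q2 q3 : α → Bool) (l : List α)
    (h : ∀ x ∈ l, (q0 x).toNat + (q1 x).toNat + (q2 x).toNat + (q3 x).toNat ≤ 1) :
    (l.filter q0 ++ l.filter q1 ++ l.filter q2 ++ l.filter q3).Perm
      (l.filter (fun x => q0 x || q1 x || q2 x || q3 x)) := by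
  induction l with
  | nil => simp
  | cons x xs ih =>
    have hx := h x (by simp)
    have ih' := ih fun y hy => h y (by simp [hy])
    by_cases h0 : q0 x <;> by_cases h1 : q1 x <;> by_cases h2 : q2 x <;> by_cases h3 : q3 x <;>
      simp [h0, h1, h2, h3] at hx ⊢
    · simpa [List.append_assoc] using pvInsPerm x []
        (xs.filter q0 ++ xs.filter q1 ++ xs.filter q2 ++ xs.filter q3)
        (by simpa [List.append_assoc] using ih')
    · simpa [List.append_assoc] using pvInsPerm x (xs.filter q0)
        (xs.filter q1 ++ xs.filter q2 ++ xs.filter q3)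
        (by simpa [List.append_assoc] using ih')
    · simpa [List.append_assoc] using pvInsPerm x (xs.filter q0 ++ xs.filter q1)
        (xs.filter q2 ++ xs.filter q3)
        (by simpa [List.append_assoc] using ih')
    · simpa [List.append_assoc] using pvInsPerm x (xs.filter q0 ++ xs.filter q1 ++ xs.filter q2)
        (xs.filter q3)
        (by simpa [List.append_assoc] using ih')
    · simpa [List.append_assoc] using ih'

-- the per-position neighbor test: mismatch at i and key match at i
def pvQ (cur w : String) (i : Int) : Bool :=
  ((PySem.List.pyGet? w.toList i) != (PySem.List.pyGet? cur.toList i))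
    && (pvKeyB w i == pvKeyB cur i)

set_option maxHeartbeats 1000000 in
theorem pvQ_spec (cur w : String)
    (hw : 4 ≤ w.toList.length) (hc : 4 ≤ cur.toList.length) :
    ((pvQ cur w 0 || pvQ cur w 1 || pvQ cur w 2 || pvQ cur w 3) = pvOneDiffA w cur)
    ∧ (pvQ cur w 0).toNat + (pvQ cur w 1).toNat + (pvQ cur w 2).toNat + (pvQ cur w 3).toNat ≤ 1 := by
  obtain ⟨a,b,c,d,t,hw'⟩ := pvLen4_decomp _ hw
  obtain ⟨a',b',c',d',t',hc'⟩ := pvLen4_decomp _ hc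
  obtain ⟨k0,k1,k2,k3⟩ := pvKey_eval w a b c d t hw'
  obtain ⟨m0,m1,m2,m3⟩ := pvKey_eval cur a' b' c' d' t' hc'
  obtain ⟨g0,g1,g2,g3⟩ := pvGet_eval w a b c d t hw'
  obtain ⟨e0,e1,e2,e3⟩ := pvGet_eval cur a' b' c' d' t' hc'
  unfold pvQ pvOneDiffA
  rw [show PySem.List.pyRange 0 4 1 = [(0:Int),1,2,3] from by decide]
  simp only [List.foldl_cons, List.foldl_nil, k0,k1,k2,k3,m0,m1,m2,m3,g0,g1,g2,g3,e0,e1,e2,e3]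
  by_cases ha : a = a' <;> by_cases hb : b = b' <;> by_cases hcc : c = c' <;> by_cases hd : d = d' <;>
    simp_all [beq_eq_decide, bne]

theorem pvFoldlApp {α : Type} (p : α → Bool) (l acc : List α) :
    l.foldl (fun acc x => if p x then acc ++ [x] else acc) acc = acc ++ l.filter p := by
  simpa using PySem.List.foldl_append_if p id l acc

set_option maxHeartbeats 1000000 in
-- the central lemma: B's bucket-built neighbor list is A's scan of the pool
theorem pvNeighbors_eq (pool : List String) (cur : String)
    (hpool : ∀ w ∈ pool, 4 ≤ w.toList.length) (hcur : 4 ≤ cur.toList.length) :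
    pvNeighborsB (pvBucketsB pool) cur = pool.filter (fun w => pvOneDiffA w cur) := by
  have hmem : ∀ p ∈ PySem.List.enumerate pool, 4 ≤ (p.2 : String).toList.length := by
    intro p hp
    rcases (PySem.List.mem_enumerate_iff _ _ _).1 hp with ⟨k, hk, rfl⟩
    exact hpool _ (List.getElem_mem hk)
  unfold pvNeighborsB
  rw [show PySem.List.pyRange 0 4 1 = [(0:Int),1,2,3] from by decide]
  simp only [List.foldl_cons, List.foldl_nil]
  rw [pvBucket_i pool cur hpool hcur 0 (by norm_num),
      pvBucket_i pool cur hpool hcur 1 (by norm_num),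
      pvBucket_i pool cur hpool hcur 2 (by norm_num),
      pvBucket_i pool cur hpool hcur 3 (by norm_num)]
  rw [pvFoldlApp, pvFoldlApp, pvFoldlApp, pvFoldlApp]
  simp only [List.nil_append, List.filter_filter]
  have hexcl : ∀ p ∈ PySem.List.enumerate pool,
      (pvQ cur p.2 0).toNat + (pvQ cur p.2 1).toNat + (pvQ cur p.2 2).toNat + (pvQ cur p.2 3).toNat ≤ 1 :=
    fun p hp => (pvQ_spec cur p.2 (hmem p hp) hcur).2
  have hperm := pvFilterPerm4 _ _ _ _ _ hexcl
  have hpair : ((PySem.List.enumerate pool).filter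
      (fun p => pvQ cur p.2 0 || pvQ cur p.2 1 || pvQ cur p.2 2 || pvQ cur p.2 3)).Pairwise
      (fun p q => p.1 < q.1) :=
    List.Pairwise.sublist (List.filter_sublist) (PySem.List.pairwise_lt_enumerate pool 0)
  rw [show (fun (p : Int × String) => PySem.List.pyGet? p.2.toList 0 != PySem.List.pyGet? cur.toList 0
        && pvKeyB p.2 0 == pvKeyB cur 0) = fun p => pvQ cur p.2 0 from rfl,
      show (fun (p : Int × String) => PySem.List.pyGet? p.2.toList 1 != PySem.List.pyGet? cur.toList 1
        && pvKeyB p.2 1 == pvKeyB cur 1) = fun p => pvQ cur p.2 1 from rfl,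
      show (fun (p : Int × String) => PySem.List.pyGet? p.2.toList 2 != PySem.List.pyGet? cur.toList 2
        && pvKeyB p.2 2 == pvKeyB cur 2) = fun p => pvQ cur p.2 2 from rfl,
      show (fun (p : Int × String) => PySem.List.pyGet? p.2.toList 3 != PySem.List.pyGet? cur.toList 3
        && pvKeyB p.2 3 == pvKeyB cur 3) = fun p => pvQ cur p.2 3 from rfl]
  rw [PySem.List.sorted_eq_of_perm_of_pairwise_lt _ _ _ hperm.symm hpair]
  rw [show (fun p : Int × String => pvQ cur p.2 0 || pvQ cur p.2 1 || pvQ cur p.2 2 || pvQ cur p.2 3)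
       = ((fun w => pvQ cur w 0 || pvQ cur w 1 || pvQ cur w 2 || pvQ cur w 3)
          ∘ (fun p : Int × String => p.2)) from rfl,
     ← List.filter_map, PySem.List.map_snd_enumerate]
  exact List.filter_congr fun w hw => (pvQ_spec cur w (hpool w hw) hcur).1

theorem pvFindFilter {α : Type} (l : List α) (p q : α → Bool) :
    (l.filter p).find? q = l.find? (fun x => p x && q x) := by
  induction l with
  | nil => rfl
  | cons x xs ih =>
    by_cases hp : p x
    · by_cases hq : q x <;> simp [List.find?, hp, hq, ih]
    · simp [List.find?, ih, Bool.of_not_eq_true hp]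

theorem pvFindCongr {α : Type} (l : List α) (p q : α → Bool)
    (h : ∀ x ∈ l, p x = q x) : l.find? p = l.find? q := by
  induction l with
  | nil => rfl
  | cons x xs ih =>
    have hx := h x (by simp)
    by_cases hp : p x
    · simp [List.find?, hp, hx ▸ hp]
    · have hq : q x = false := by rw [← hx]; exact Bool.of_not_eq_true hp
      simp only [List.find?, Bool.of_not_eq_true hp, hq]
      exact ih fun y hy => h y (by simp [hy])

-- lockstep of the two loops
theorem pvLockstep (LA LB : List String)
    (hA : ∀ w ∈ LA, 4 ≤ w.toList.length) (hB : ∀ w ∈ LB, 4 ≤ w.toList.length) :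
    ∀ (fuel : Nat) (used : PySem.Set String) (cur : String), 4 ≤ cur.toList.length →
    ∀ (turn : Int),
    pvLoopA LA LB fuel used cur turn
      = pvLoopB (pvBucketsB LA) (pvBucketsB LB) fuel used cur turn := by
  intro fuel
  induction fuel with
  | zero => intro used cur _ turn; rfl
  | succ n ih =>
    intro used cur hcur turn
    rw [pvLoopA, pvLoopB]
    have hnb : pvNeighborsB (if turn == 0 then pvBucketsB LA else pvBucketsB LB) cur
        = (if turn == 0 then LA else LB).filter (fun w => pvOneDiffA w cur) := by
      by_cases ht : turn == 0 <;>
        simp only [ht, if_true, if_false, Bool.false_eq_true] <;>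
        [exact pvNeighbors_eq LA cur hA hcur; exact pvNeighbors_eq LB cur hB hcur]
    have hL : ∀ w ∈ (if turn == 0 then LA else LB), 4 ≤ w.toList.length := by
      by_cases ht : turn == 0 <;> simp only [ht] <;> simp_all
    rw [hnb, pvFindFilter,
      pvFindCongr _ _ _ (fun w _ => by rw [Bool.and_comm])]
    cases hfind : (if turn == 0 then LA else LB).find?
        (fun w => pvOneDiffA w cur && !(PySem.Set.contains used w)) with
    | none => rfl
    | some w =>
      have hw : w ∈ (if turn == 0 then LA else LB) := List.mem_of_find?_eq_some hfind
      exact ih (PySem.Set.add used w) w (hL w hw) (PySem.Int.bxor turn 1)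

theorem pvAddLen {α : Type} [DecidableEq α] (s : List α) (x : α) :
    (PySem.Set.add s x).length ≤ s.length + 1 := by
  unfold PySem.Set.add; split <;> simp

theorem pvOfList_len_le {α : Type} [DecidableEq α] (l : List α) :
    (PySem.Set.ofList l).length ≤ l.length := by
  rw [PySem.Set.ofList_eq_foldl]
  suffices h : ∀ (s : List α), (l.foldl PySem.Set.add s).length ≤ s.length + l.length by
    simpa using h []
  induction l with
  | nil => simp
  | cons x xs ih => intro s; simp only [List.foldl]
                    calc (xs.foldl PySem.Set.add (PySem.Set.add s x)).length
                        ≤ (PySem.Set.add s x).length + xs.length := ih _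
                      _ ≤ _ := by have := pvAddLen s x; simp [List.length_cons]; omega

theorem pvFilterLen (l : List String) :
    ∀ w ∈ l.filter pvDistinct4A, 4 ≤ w.toList.length := by
  intro w hw
  rcases List.mem_filter.1 hw with ⟨_, hd⟩
  have h4 : (PySem.Set.ofList w.toList).length = 4 := by
    simpa [pvDistinct4A] using hd
  have := pvOfList_len_le w.toList
  omega

theorem pvEmptyFilter (l : List String)
    (h : ∀ w ∈ l, (PySem.Set.ofList w.toList).length ≠ 4) :
    l.filter pvDistinct4A = [] := by
  rw [List.filter_eq_nil_iff]
  intro w hw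
  simp [pvDistinct4A]
  exact h w hw

theorem pvNeighborsEmpty (cur : String) : pvNeighborsB (pvBucketsB []) cur = [] := rfl

theorem pvAnyFilter (l : List String) (cur : String)
    (h : ∀ w ∈ l, 4 ≤ w.toList.length) (hcur : 4 ≤ cur.toList.length) :
    (pvNeighborsB (pvBucketsB l) cur).isEmpty = !(l.any (fun w => pvOneDiffA w cur)) := by
  rw [pvNeighbors_eq l cur h hcur]
  induction l with
  | nil => rfl
  | cons x xs ih =>
    by_cases hx : pvOneDiffA x cur <;>
      simp_all [List.any_cons]

theorem mutations_eq (alice bob : List String) (word : String) (first : Int)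
    (hpre : Pre_mutations alice bob word first) :
    mutations alice bob word first = mutations_alt alice bob word first := by
  unfold mutations mutations_alt
  simp only [show pvDistinct4B = pvDistinct4A from rfl]
  rcases hpre with hlen | hall
  · have hA := pvFilterLen alice
    have hB := pvFilterLen bob
    rw [pvAnyFilter _ _ hA hlen, pvAnyFilter _ _ hB hlen]
    simp only [List.any_append, Bool.not_or, Bool.and_comm]
    split
    · rfl
    · exact pvLockstep _ _ hA hB _ _ word hlen first
  · have ha : alice.filter pvDistinct4A = [] :=
      pvEmptyFilter alice (fun w hw => hall w (List.mem_append_left _ hw))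
    have hb : bob.filter pvDistinct4A = [] :=
      pvEmptyFilter bob (fun w hw => hall w (List.mem_append_right _ hw))
    rw [ha, hb]
    simp [pvNeighborsEmpty]

-- ===== VERDICT (by name: the statement is the Claim_ definition above) =====
theorem mutations_spec : Claim_equal_mutations := by
  intro alice bob word first _ hpre
  unfold Spec_mutations
  exact mutations_eq alice bob word first hpre
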